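-- pv_equiv track=rewrite | github.com/JakobMifflin2005/CS325Q9 | textanalyzer.py | found_common_words
-- ===== SOURCE A (Python) =====
-- def found_common_words(book, common_words):
--     book_words = book.lower().split()
--     found_words = {}
--     for word in common_words:
--         count = book_words.count(word)
--         if count > 0:
--             found_words[word] = count
--     return found_words
-- ===== SOURCE B (Python) =====
-- def found_common_words(book, common_words):
--     book_words = sorted(book.lower().split())
--     n = len(book_words)
--
--     def bound(pred):
--         lo, hi = 0, n
--         while lo < hi:
--             mid = (lo + hi) // 2
--             if pred(book_words[mid]):
--                 lo = mid + 1
--             else: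
--                 hi = mid
--         return lo
--
--     found_words = {}
--     for word in common_words:
--         lo = bound(lambda y: y < word)
--         hi = bound(lambda y: y <= word)
--         if lo < hi:
--             found_words[word] = hi - lo
--     return found_words
-- ===== Notes on version B (the rewrite author's own statement) =====
-- stated objective: alternative
-- what changed: B sorts the book's tokens once and counts each common word as the difference of two hand-written binary-search bounds (first index not < word, first index not <= word) on the sorted list, instead of A's linear .count rescan of the token list for every common word.
import Mathlib
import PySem

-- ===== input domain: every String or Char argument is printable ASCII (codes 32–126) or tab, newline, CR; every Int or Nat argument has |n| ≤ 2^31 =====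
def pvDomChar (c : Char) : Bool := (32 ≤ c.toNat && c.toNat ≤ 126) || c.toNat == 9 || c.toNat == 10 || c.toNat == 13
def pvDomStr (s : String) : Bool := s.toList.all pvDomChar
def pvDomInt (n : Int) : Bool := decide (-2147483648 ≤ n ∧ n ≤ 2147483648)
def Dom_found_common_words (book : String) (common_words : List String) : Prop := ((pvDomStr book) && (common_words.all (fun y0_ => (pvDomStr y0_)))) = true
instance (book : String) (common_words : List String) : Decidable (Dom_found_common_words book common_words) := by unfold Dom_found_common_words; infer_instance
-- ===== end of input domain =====

-- B replaces A's per-common-word linear rescan (.count) by sorting the token list once and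
-- counting each common word as the difference of two binary-search bounds (objective: alternative).

-- ===== PORT A =====
def found_common_words (book : String) (common_words : List String) : List (String × Int) :=
  let book_words := PySem.Str.split₀ (PySem.Str.lower book)
  (common_words.foldl (fun found_words word =>
      let count : Int := (PySem.List.count book_words word : Int)
      if count > 0 then found_words.insert word count else found_words)
    PySem.Dict.empty).items

-- ===== PORT B =====
-- Python's inner `bound(pred)` while-loop; `book_words[mid]` always has 0 ≤ mid < len(book_words)
-- (mid = (lo+hi)//2 with 0 ≤ lo < hi ≤ len), so `getD _ ""` is exact there.
def pvBound (bw : List String) (p : String → Bool) (lo hi : Nat) : Nat :=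
  if _h : lo < hi then
    let mid := (lo + hi) / 2
    if p (bw.getD mid "") then pvBound bw p (mid + 1) hi else pvBound bw p lo mid
  else lo
termination_by hi - lo
decreasing_by all_goals omega

def found_common_words_alt (book : String) (common_words : List String) : List (String × Int) :=
  let book_words := PySem.List.sorted (PySem.Str.split₀ (PySem.Str.lower book)) (fun x => x) false
  let n := book_words.length
  (common_words.foldl (fun found_words word =>
      let lo := pvBound book_words (fun y => decide (y < word)) 0 n
      let hi := pvBound book_words (fun y => decide (y ≤ word)) 0 n
      if lo < hi then found_words.insert word ((hi : Int) - (lo : Int)) else found_words)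
    PySem.Dict.empty).items

-- ===== PRECONDITION & SPEC =====
def Spec_found_common_words (book : String) (common_words : List String) (out : List (String × Int)) : Prop := out = found_common_words_alt book common_words
instance (book : String) (common_words : List String) (out : List (String × Int)) : Decidable (Spec_found_common_words book common_words out) := by unfold Spec_found_common_words; infer_instance

-- ===== CLAIM (what is proved, stated in full; the proofs are below) =====
def Claim_equal_found_common_words : Prop := ∀ (book : String) (common_words : List String), Dom_found_common_words book common_words → Spec_found_common_words book common_words (found_common_words book common_words)

-- ===== LEMMAS AND PROOFS =====

-- the binary-search loop, with a monotone (downward-closed) index predicate, returns the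
-- boundary index: everything strictly below satisfies p, everything from it on fails p
theorem pvBound_spec (bw : List String) (p : String → Bool) (lo hi : Nat)
    (hhi : hi ≤ bw.length) (hle : lo ≤ hi)
    (hmono : ∀ i j : Nat, i ≤ j → j < bw.length → p (bw.getD j "") = true → p (bw.getD i "") = true)
    (hbelow : ∀ i, i < lo → i < bw.length → p (bw.getD i "") = true)
    (habove : ∀ i, hi ≤ i → i < bw.length → p (bw.getD i "") = false) :
    lo ≤ pvBound bw p lo hi ∧ pvBound bw p lo hi ≤ hi ∧
      (∀ i, i < pvBound bw p lo hi → i < bw.length → p (bw.getD i "") = true) ∧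
      (∀ i, pvBound bw p lo hi ≤ i → i < bw.length → p (bw.getD i "") = false) := by
  fun_induction pvBound bw p lo hi with
  | case1 lo hi h mid hp ih =>
    have hmidlt : mid < hi := by omega
    have hmidlen : mid < bw.length := by omega
    have h1 := ih hhi (by omega)
      (fun i hi1 hi2 => hmono i mid (by omega) hmidlen hp)
      habove
    refine ⟨?_, h1.2.1, h1.2.2.1, h1.2.2.2⟩
    have := h1.1; omega
  | case2 lo hi h mid hp ih =>
    have hmidlt : mid < hi := by omega
    have hmidlen : mid < bw.length := by omega
    have hpf : p (bw.getD mid "") = false := by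
      revert hp; cases p (bw.getD mid "") <;> simp
    have h1 := ih (by omega) (by omega) hbelow
      (fun i hi1 hi2 => by
        cases hpi : p (bw.getD i "") with
        | false => rfl
        | true =>
            have hcontr := hmono mid i hi1 hi2 hpi
            rw [hcontr] at hpf
            exact hpf.symm ▸ hpf)
    refine ⟨h1.1, ?_, h1.2.2.1, h1.2.2.2⟩
    have := h1.2.1; omega
  | case3 lo hi h =>
    have heq : lo = hi := by omega
    exact ⟨le_refl _, by omega, fun i h1 h2 => hbelow i h1 h2,
      fun i h1 h2 => habove i (by omega) h2⟩

-- a list whose positions equal to w are exactly the interval [a, b) contains w exactly b - a times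
theorem count_eq_of_interval (l : List String) (w : String) (a b : Nat)
    (hb : b ≤ l.length) (hab : a ≤ b)
    (h : ∀ i (hi : i < l.length), l[i] = w ↔ (a ≤ i ∧ i < b)) :
    List.count w l = b - a := by
  have hdd : (l.drop a).drop (b - a) = l.drop b := by
    rw [List.drop_drop]; congr 1; omega
  have hdecomp : l = l.take a ++ ((l.drop a).take (b - a) ++ l.drop b) := by
    rw [← hdd, List.take_append_drop, List.take_append_drop]
  have hmid : (l.drop a).take (b - a) = List.replicate (b - a) w := by
    apply List.ext_getElem
    · simp; omega
    · intro j h1 h2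
      simp only [List.getElem_take, List.getElem_drop, List.getElem_replicate]
      have hj : j < b - a := by simpa using h2
      exact (h (a + j) (by omega)).mpr ⟨by omega, by omega⟩
  have hpre : List.count w (l.take a) = 0 := by
    rw [List.count_eq_zero]
    intro hmem
    obtain ⟨i, hilt, hieq⟩ := List.mem_iff_getElem.mp hmem
    have hilt' : i < a ∧ i < l.length := by simpa using hilt
    have : l[i]'(hilt'.2) = w := by
      rw [← hieq]; simp [List.getElem_take]
    exact absurd ((h i _).mp this).1 (by omega)
  have hpost : List.count w (l.drop b) = 0 := by
    rw [List.count_eq_zero]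
    intro hmem
    obtain ⟨i, hilt, hieq⟩ := List.mem_iff_getElem.mp hmem
    have hilt' : i < l.length - b := by simpa using hilt
    have : l[b + i]'(by omega) = w := by
      rw [← hieq]; simp [List.getElem_drop]
    exact absurd ((h (b + i) _).mp this).2 (by omega)
  calc List.count w l = List.count w (l.take a ++ ((l.drop a).take (b - a) ++ l.drop b)) := by
        rw [← hdecomp]
    _ = b - a := by
        rw [List.count_append, List.count_append, hpre, hmid, hpost, List.count_replicate_self]
        omega

-- for the sorted token list, hi-bound minus lo-bound IS the count of w
theorem pv_bounds_count (bws : List String) (w : String) :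
    pvBound (PySem.List.sorted bws (fun x => x) false) (fun y => decide (y < w)) 0
        (PySem.List.sorted bws (fun x => x) false).length ≤
      pvBound (PySem.List.sorted bws (fun x => x) false) (fun y => decide (y ≤ w)) 0
        (PySem.List.sorted bws (fun x => x) false).length ∧
    List.count w bws =
      pvBound (PySem.List.sorted bws (fun x => x) false) (fun y => decide (y ≤ w)) 0
        (PySem.List.sorted bws (fun x => x) false).length -
      pvBound (PySem.List.sorted bws (fun x => x) false) (fun y => decide (y < w)) 0
        (PySem.List.sorted bws (fun x => x) false).length := by
  set s := PySem.List.sorted bws (fun x => x) false with hs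
  set lo := pvBound s (fun y => decide (y < w)) 0 s.length with hlo
  set hi := pvBound s (fun y => decide (y ≤ w)) 0 s.length with hhi
  have hsorted : List.Pairwise (fun a b : String => a ≤ b) s :=
    PySem.List.sorted_pairwise bws (fun x => x)
  have hmono' : ∀ i j : Nat, i ≤ j → j < s.length → i < s.length →
      s.getD i "" ≤ s.getD j "" := by
    intro i j hij hj hi'
    rw [List.getD_eq_getElem _ _ hi', List.getD_eq_getElem _ _ hj]
    rcases Nat.lt_or_ge i j with hlt | hge
    · exact List.pairwise_iff_getElem.mp hsorted i j hi' hj hlt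
    · have hieq : i = j := by omega
      subst hieq; exact le_refl _
  have hlospec := pvBound_spec s (fun y => decide (y < w)) 0 s.length (le_refl _) (Nat.zero_le _)
    (fun i j hij hj hp => by
      simp only [decide_eq_true_eq] at *
      exact lt_of_le_of_lt (hmono' i j hij hj (by omega)) hp)
    (fun i h1 _ => absurd h1 (Nat.not_lt_zero i))
    (fun i h1 h2 => absurd h1 (by omega))
  have hhispec := pvBound_spec s (fun y => decide (y ≤ w)) 0 s.length (le_refl _) (Nat.zero_le _)
    (fun i j hij hj hp => by
      simp only [decide_eq_true_eq] at *
      exact le_trans (hmono' i j hij hj (by omega)) hp)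
    (fun i h1 _ => absurd h1 (Nat.not_lt_zero i))
    (fun i h1 h2 => absurd h1 (by omega))
  have hchar : ∀ i (hi2 : i < s.length), s[i] = w ↔ (lo ≤ i ∧ i < hi) := by
    intro i hi2
    constructor
    · intro heq
      constructor
      · by_contra hcon
        have := hlospec.2.2.1 i (by omega) hi2
        simp only [decide_eq_true_eq] at this
        rw [List.getD_eq_getElem _ _ hi2, heq] at this
        exact lt_irrefl w this
      · by_contra hcon
        have := hhispec.2.2.2 i (by omega) hi2
        simp only [decide_eq_false_iff_not] at this
        rw [List.getD_eq_getElem _ _ hi2, heq] at this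
        exact this (le_refl w)
    · intro ⟨h1, h2⟩
      have ha := hlospec.2.2.2 i h1 hi2
      have hb := hhispec.2.2.1 i h2 hi2
      simp only [decide_eq_false_iff_not, decide_eq_true_eq] at ha hb
      rw [List.getD_eq_getElem _ _ hi2] at ha hb
      exact le_antisymm hb (not_lt.mp ha)
  have hlohi : lo ≤ hi := by
    by_contra hcon
    have hhin : hi < s.length := by have := hlospec.2.1; omega
    have h1 := hlospec.2.2.1 hi (by omega) hhin
    have h2 := hhispec.2.2.2 hi (le_refl _) hhin
    simp only [decide_eq_true_eq, decide_eq_false_iff_not] at h1 h2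
    exact h2 (le_of_lt h1)
  refine ⟨hlohi, ?_⟩
  have hperm : s.Perm bws := PySem.List.sorted_perm bws (fun x => x) false
  rw [← hperm.count_eq w]
  exact count_eq_of_interval s w lo hi hhispec.2.1 hlohi hchar

-- the two per-word fold steps agree
theorem pv_step_eq (bws : List String) (d : PySem.Dict String Int) (w : String) :
    (let count : Int := (PySem.List.count bws w : Int)
     if count > 0 then d.insert w count else d)
      = (let s := PySem.List.sorted bws (fun x => x) false
         let lo := pvBound s (fun y => decide (y < w)) 0 s.length
         let hi := pvBound s (fun y => decide (y ≤ w)) 0 s.length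
         if lo < hi then d.insert w ((hi : Int) - (lo : Int)) else d) := by
  obtain ⟨hle, hcount⟩ := pv_bounds_count bws w
  simp only [PySem.List.count_eq, hcount]
  by_cases hlt : pvBound (PySem.List.sorted bws (fun x => x) false) (fun y => decide (y < w)) 0
      (PySem.List.sorted bws (fun x => x) false).length <
      pvBound (PySem.List.sorted bws (fun x => x) false) (fun y => decide (y ≤ w)) 0
      (PySem.List.sorted bws (fun x => x) false).length
  · rw [if_pos hlt, if_pos (by exact_mod_cast Nat.sub_pos_of_lt hlt)]
    congr 1
    omega
  · rw [if_neg hlt, if_neg (by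
      have h0 : (pvBound (PySem.List.sorted bws (fun x => x) false) (fun y => decide (y ≤ w)) 0
          (PySem.List.sorted bws (fun x => x) false).length -
        pvBound (PySem.List.sorted bws (fun x => x) false) (fun y => decide (y < w)) 0
          (PySem.List.sorted bws (fun x => x) false).length : Nat) = 0 := by omega
      rw [h0]; simp)]

-- ===== VERDICT (by name: the statement is the Claim_ definition above) =====
theorem found_common_words_spec : Claim_equal_found_common_words := by
  intro book common_words _
  unfold Spec_found_common_words found_common_words found_common_words_alt
  dsimp only
  refine congrArg PySem.Dict.items ?_
  apply PySem.List.foldl_congr_mem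
  intro acc w _
  exact pv_step_eq (PySem.Str.split₀ (PySem.Str.lower book)) acc w
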